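-- pv_equiv track=rewrite | github.com/Xilinx/finn | src/finn/transformation/fpgadataflow/set_fifo_depths.py | get_fifo_split_configs
-- ===== SOURCE A (Python) =====
-- def get_fifo_split_configs(depth, max_qsrl_depth=256, max_vivado_depth=32768):
--     """Break non-power-of-2 sized FIFO depths into several ones"""
--
--     def floor_pow2(x):
--         if (x & (x - 1) == 0) and x != 0:
--             return x
--         else:
--             return 1 << ((x - 1).bit_length() - 1)
--
--     def decompose_pow2(x):
--         if x <= max_qsrl_depth:
--             return [x]
--         else:
--             r = floor_pow2(x)
--             if x == r:
--                 return [x]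
--             else:
--                 return [r, *decompose_pow2(x - r)]
--
--     ret = []
--     # trivial case: for small FIFOs, return as-is with rtl style
--     if depth <= max_qsrl_depth:
--         return [(depth, "rtl")]
--     # first pass: ensure max depth is respected
--     # (restricted by Vivado AXIS infra IP)
--     remainder = depth
--     while remainder != 0:
--         if remainder > max_vivado_depth:
--             ret.append(max_vivado_depth)
--             remainder -= max_vivado_depth
--         else:
--             ret.append(remainder)
--             remainder = 0
--     # second pass: break non-power-of-2 sized FIFOs
--     # into several ones
--
--     ret_pass2 = list(map(decompose_pow2, ret))
--     # unpack list of lists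
--     ret_pass2 = [x for dec_list in ret_pass2 for x in dec_list]
--
--     # finally, add impl_style to each split FIFO
--     ret_final = []
--     for cand_depth in ret_pass2:
--         if cand_depth <= max_qsrl_depth:
--             ret_final.append((cand_depth, "rtl"))
--         else:
--             ret_final.append((cand_depth, "vivado"))
--
--     return ret_final
-- ===== SOURCE B (Python) =====
-- def get_fifo_split_configs(depth, max_qsrl_depth=256, max_vivado_depth=32768):
--     """Break non-power-of-2 sized FIFO depths into several ones"""
--
--     def floor_pow2(x):
--         if (x & (x - 1) == 0) and x != 0:
--             return x
--         else:
--             return 1 << ((x - 1).bit_length() - 1)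
--
--     if depth <= max_qsrl_depth:
--         return [(depth, "rtl")]
--     # single fused pass: `remainder` is the not-yet-chunked depth, `chunk` the
--     # residue of the current max_vivado_depth-bounded chunk being decomposed.
--     ret = []
--     remainder = depth
--     chunk = 0
--     while remainder > 0 or chunk > 0:
--         if chunk <= 0:
--             chunk = min(remainder, max_vivado_depth)
--             remainder -= chunk
--         if chunk <= max_qsrl_depth:
--             ret.append((chunk, "rtl"))
--             chunk = 0
--         else:
--             r = floor_pow2(chunk)
--             ret.append((r, "vivado" if max_qsrl_depth < r else "rtl"))
--             chunk -= r
--     return ret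
-- ===== Notes on version B (the rewrite author's own statement) =====
-- stated objective: simpler
-- what changed: Replaces A's three passes (a chunking while-loop into a list, a recursive decompose_pow2 mapped and flattened over it, and a final tagging loop) by one fused while-loop over two integers (remainder, chunk) that emits the tagged tuples directly, with no recursion and no intermediate lists.
-- outside the precondition, e.g. on get_fifo_split_configs(-5, -10, 0): A returns [(4, 'vivado'), (8, 'vivado'), (-17, 'rtl')], B returns []
import Mathlib
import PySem

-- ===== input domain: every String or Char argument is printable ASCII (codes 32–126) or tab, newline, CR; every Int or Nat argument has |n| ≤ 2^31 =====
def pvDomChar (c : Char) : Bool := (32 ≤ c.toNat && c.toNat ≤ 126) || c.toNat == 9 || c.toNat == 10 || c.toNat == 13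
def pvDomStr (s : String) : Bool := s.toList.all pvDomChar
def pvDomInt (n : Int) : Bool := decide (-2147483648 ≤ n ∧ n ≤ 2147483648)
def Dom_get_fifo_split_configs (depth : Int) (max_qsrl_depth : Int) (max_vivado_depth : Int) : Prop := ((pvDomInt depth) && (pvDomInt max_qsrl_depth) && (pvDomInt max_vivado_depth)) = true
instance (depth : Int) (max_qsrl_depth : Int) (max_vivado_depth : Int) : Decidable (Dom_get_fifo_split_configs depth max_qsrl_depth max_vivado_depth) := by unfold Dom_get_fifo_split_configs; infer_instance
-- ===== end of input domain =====

-- B fuses A's three passes (chunking loop, recursive decompose_pow2 map+flatten, tagging loop)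
-- into one loop over two integers that emits the tagged tuples directly; objective: simpler.

-- ===== PORT A =====
-- floor_pow2 (textually identical helper in both Pythons): `x & (x-1)` is PySem.Int.band,
-- `(x-1).bit_length()` is PySem.Int.bitLength, `1 << k` is `(1:Int) <<< k`.  Python's shift
-- amount is negative only for x = 1, which takes the first branch, so the Nat truncation of
-- `bitLength (x-1) - 1` is never observed.
def floorPow2 (x : Int) : Int :=
  if PySem.Int.band x (x - 1) = 0 ∧ x ≠ 0 then x
  else (1 : Int) <<< (PySem.Int.bitLength (x - 1) - 1)

-- needed by the ports' termination proofs, hence stated above them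
lemma floorPow2_bounds (x : Int) (hx : 0 < x) : 1 ≤ floorPow2 x ∧ floorPow2 x ≤ x := by
  unfold floorPow2
  split_ifs with h
  · omega
  · have hx1 : x ≠ 1 := by
      rintro rfl
      exact h ⟨by decide, by decide⟩
    have hx2 : 2 ≤ x := by omega
    have hne : x - 1 ≠ 0 := by omega
    have hle : 2 ^ (PySem.Int.bitLength (x - 1) - 1) ≤ (x - 1).natAbs :=
      PySem.Int.two_pow_bitLength_le (x - 1) hne
    have habs : ((x - 1).natAbs : Int) = x - 1 := Int.natAbs_of_nonneg (by omega)
    rw [Int.shiftLeft_eq, one_mul]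
    constructor
    · exact one_le_pow₀ (by norm_num)
    · calc (2 : Int) ^ (PySem.Int.bitLength (x - 1) - 1)
          = ((2 ^ (PySem.Int.bitLength (x - 1) - 1) : Nat) : Int) := by push_cast; ring
        _ ≤ ((x - 1).natAbs : Int) := by exact_mod_cast hle
        _ ≤ x := by omega

-- decompose_pow2 (A's inner recursion)
def decomposePow2 (max_qsrl_depth : Int) (x : Int) : List Int :=
  if x ≤ max_qsrl_depth then [x]
  else
    let r := floorPow2 x
    if x = r then [x]
    else if h : (x - r).toNat < x.toNat then r :: decomposePow2 max_qsrl_depth (x - r)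
    else []  -- totality guard only: here Python recurses forever (never reached for 0 < x)
termination_by x.toNat

-- A's first pass: the chunking while-loop
def chunkLoop (max_vivado_depth : Int) (remainder : Int) : List Int :=
  if hz : remainder = 0 then []
  else if hgt : max_vivado_depth < remainder then
    if hm : 0 < max_vivado_depth then
      max_vivado_depth :: chunkLoop max_vivado_depth (remainder - max_vivado_depth)
    else []  -- totality guard only: here Python's while-loop never terminates
  else [remainder]
termination_by remainder.toNat
decreasing_by omega

def get_fifo_split_configs (depth : Int) (max_qsrl_depth : Int) (max_vivado_depth : Int) : List (Int × String) :=
  if depth ≤ max_qsrl_depth then [(depth, "rtl")]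
  else
    let ret := chunkLoop max_vivado_depth depth
    let ret_pass2 := (ret.map (decomposePow2 max_qsrl_depth)).flatten
    ret_pass2.map (fun cand => if cand ≤ max_qsrl_depth then (cand, "rtl") else (cand, "vivado"))

-- ===== PORT B =====
-- B's fused while-loop over the state (remainder, chunk); the refill branch (`chunk <= 0`)
-- inlines the shared tail of the Python iteration body.
def fusedLoop (max_qsrl_depth : Int) (max_vivado_depth : Int) (remainder : Int) (chunk : Int) : List (Int × String) :=
  if hw : 0 < remainder ∨ 0 < chunk then
    if hc : chunk ≤ 0 then
      if hm : 0 < max_vivado_depth then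
        let c := min remainder max_vivado_depth
        if c ≤ max_qsrl_depth then
          (c, "rtl") :: fusedLoop max_qsrl_depth max_vivado_depth (remainder - c) 0
        else
          let r := floorPow2 c
          (r, if max_qsrl_depth < r then "vivado" else "rtl") ::
            fusedLoop max_qsrl_depth max_vivado_depth (remainder - c) (c - r)
      else []  -- totality guard only: here Python's while-loop never terminates
    else
      if chunk ≤ max_qsrl_depth then
        (chunk, "rtl") :: fusedLoop max_qsrl_depth max_vivado_depth remainder 0
      else
        let r := floorPow2 chunk
        (r, if max_qsrl_depth < r then "vivado" else "rtl") ::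
          fusedLoop max_qsrl_depth max_vivado_depth remainder (chunk - r)
  else []
termination_by remainder.toNat + chunk.toNat
decreasing_by
  · omega
  · have := floorPow2_bounds (min remainder max_vivado_depth) (by omega)
    omega
  · omega
  · have := floorPow2_bounds chunk (by omega)
    omega

def get_fifo_split_configs_alt (depth : Int) (max_qsrl_depth : Int) (max_vivado_depth : Int) : List (Int × String) :=
  if depth ≤ max_qsrl_depth then [(depth, "rtl")]
  else fusedLoop max_qsrl_depth max_vivado_depth depth 0

-- ===== PRECONDITION & SPEC =====
-- Pre_ restricts to the natural domain of FIFO depths: elsewhere (depth negative yet above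
-- max_qsrl_depth, or a positive depth with a nonpositive max_vivado_depth) A either loops
-- forever or returns accidental pieces of its bit arithmetic on negative numbers (e.g.
-- negative "depths"), while B's loop naturally returns [].
def Pre_get_fifo_split_configs (depth : Int) (max_qsrl_depth : Int) (max_vivado_depth : Int) : Prop :=
  depth ≤ max_qsrl_depth ∨ depth = 0 ∨ (0 < depth ∧ 0 < max_vivado_depth)
instance (depth : Int) (max_qsrl_depth : Int) (max_vivado_depth : Int) : Decidable (Pre_get_fifo_split_configs depth max_qsrl_depth max_vivado_depth) := by unfold Pre_get_fifo_split_configs; infer_instance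

def pvWitness_get_fifo_split_configs : Int × Int × Int := (1000, 256, 32768)

def Spec_get_fifo_split_configs (depth : Int) (max_qsrl_depth : Int) (max_vivado_depth : Int) (out : List (Int × String)) : Prop := out = get_fifo_split_configs_alt depth max_qsrl_depth max_vivado_depth
instance (depth : Int) (max_qsrl_depth : Int) (max_vivado_depth : Int) (out : List (Int × String)) : Decidable (Spec_get_fifo_split_configs depth max_qsrl_depth max_vivado_depth out) := by unfold Spec_get_fifo_split_configs; infer_instance

-- ===== CLAIM (what is proved, stated in full; the proofs are below) =====
def Claim_equal_get_fifo_split_configs : Prop := ∀ (depth : Int) (max_qsrl_depth : Int) (max_vivado_depth : Int), Dom_get_fifo_split_configs depth max_qsrl_depth max_vivado_depth → Pre_get_fifo_split_configs depth max_qsrl_depth max_vivado_depth → Spec_get_fifo_split_configs depth max_qsrl_depth max_vivado_depth (get_fifo_split_configs depth max_qsrl_depth max_vivado_depth)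

-- ===== LEMMAS AND PROOFS =====

-- one round of B's loop with a positive chunk plays back exactly the tagged decomposition
-- of that chunk, then continues with chunk = 0
lemma fused_eq_tag_decompose (q m : Int) :
    ∀ (n : Nat) (r c : Int), c.toNat = n → 0 < c →
      fusedLoop q m r c =
        (decomposePow2 q c).map (fun cand => if cand ≤ q then (cand, "rtl") else (cand, "vivado"))
          ++ fusedLoop q m r 0 := by
  intro n
  induction n using Nat.strong_induction_on with
  | _ n ih =>
    intro r c hn hc
    rw [fusedLoop, decomposePow2]
    rw [dif_pos (Or.inr hc), dif_neg (by omega : ¬ c ≤ 0)]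
    by_cases hq : c ≤ q
    · simp [hq]
    · obtain ⟨hp1, hp2⟩ := floorPow2_bounds c hc
      rw [if_neg hq, if_neg hq]
      dsimp only
      by_cases hcr : c = floorPow2 c
      · rw [if_pos hcr]
        have h0 : c - floorPow2 c = 0 := by omega
        rw [h0, ← hcr, if_pos (by omega : q < c)]
        simp [hq]
      · rw [if_neg hcr]
        have hlt : (c - floorPow2 c).toNat < c.toNat := by omega
        rw [dif_pos hlt]
        have hpos : 0 < c - floorPow2 c := by omega
        rw [ih (c - floorPow2 c).toNat (by omega) r (c - floorPow2 c) rfl hpos]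
        simp only [List.map_cons, List.cons_append]
        congr 1
        split_ifs <;> simp_all <;> omega

-- B's refill step: a zero chunk with work left behaves as the refilled state
lemma fused_refill (q m r : Int) (hr : 0 < r) (hm : 0 < m) :
    fusedLoop q m r 0 = fusedLoop q m (r - min r m) (min r m) := by
  have hc : 0 < min r m := by omega
  rw [fusedLoop]
  conv_rhs => rw [fusedLoop]
  rw [dif_pos (Or.inl hr), dif_pos (Or.inr hc), dif_pos (le_refl (0 : Int)),
    dif_neg (by omega : ¬ min r m ≤ 0), dif_pos hm]

lemma fused_zero (q m : Int) : fusedLoop q m 0 0 = [] := by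
  rw [fusedLoop]; simp

-- B's loop from a fresh state equals A's chunk-then-decompose-then-tag pipeline
lemma fused_eq_chunks (q m : Int) (hm : 0 < m) :
    ∀ (n : Nat) (r : Int), r.toNat = n → 0 < r →
      fusedLoop q m r 0 =
        ((chunkLoop m r).map (decomposePow2 q)).flatten.map
          (fun cand => if cand ≤ q then (cand, "rtl") else (cand, "vivado")) := by
  intro n
  induction n using Nat.strong_induction_on with
  | _ n ih =>
    intro r hn hr
    rw [fused_refill q m r hr hm,
      fused_eq_tag_decompose q m (min r m).toNat (r - min r m) (min r m) rfl (by omega),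
      chunkLoop]
    rw [dif_neg (by omega : ¬ r = 0)]
    by_cases hgt : m < r
    · have hmin : min r m = m := by omega
      rw [dif_pos hgt, dif_pos hm]
      rw [hmin, ih (r - m).toNat (by omega) (r - m) rfl (by omega)]
      simp
    · have hmin : min r m = r := by omega
      rw [dif_neg hgt, hmin]
      have : r - r = 0 := by omega
      rw [this, fused_zero]
      simp

-- ===== VERDICT (by name: the statement is the Claim_ definition above) =====
theorem get_fifo_split_configs_spec : Claim_equal_get_fifo_split_configs := by
  intro depth q m _ hpre
  unfold Spec_get_fifo_split_configs get_fifo_split_configs get_fifo_split_configs_alt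
  by_cases hd : depth ≤ q
  · simp [hd]
  · rw [if_neg hd, if_neg hd]
    rcases hpre with h | h | ⟨h1, h2⟩
    · exact absurd h hd
    · subst h
      rw [fused_zero, chunkLoop]
      simp
    · exact (fused_eq_chunks q m h2 depth.toNat depth rfl h1).symm
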